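-- pv_equiv track=rewrite | github.com/pypi-data/pypi-mirror-8 | packages/zozol/zozol-0.1.2.tar.gz/zozol-0.1.2/zozol/ber.py | encode_tag
-- ===== SOURCE A (Python) =====
-- def encode_tag(tag, cls, content, container, ident=0):
--     container.append(tag | cls << 6)
--     tlen = len(content)
--     if tlen < 128:
--         container.append(tlen)
--     else:
--         len_bytes = []
--         while tlen:
--             len_bytes.append(tlen & 0xFF)
--             tlen >>= 8
--
--         container.append(0x80 | len(len_bytes))
--         while len_bytes:
--             container.append(len_bytes.pop())
--
--     for byte in content:
--         container.append(byte)
--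
--     return container
-- ===== SOURCE B (Python) =====
-- def encode_tag(tag, cls, content, container, ident=0):
--     container.append(tag | cls << 6)
--     tlen = len(content)
--     if tlen < 128:
--         container.append(tlen)
--     else:
--         n = (tlen.bit_length() + 7) // 8
--         container.append(0x80 | n)
--         container.extend(tlen.to_bytes(n, 'big'))
--     container.extend(content)
--     return container
-- ===== Notes on version B (the rewrite author's own statement) =====
-- stated objective: idiomatic
-- what changed: The long-form length branch no longer builds a little-endian byte list in a while-loop and reverses it by popping; B computes the byte count from bit_length and emits the length bytes big-endian directly via int.to_bytes.
import Mathlib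
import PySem

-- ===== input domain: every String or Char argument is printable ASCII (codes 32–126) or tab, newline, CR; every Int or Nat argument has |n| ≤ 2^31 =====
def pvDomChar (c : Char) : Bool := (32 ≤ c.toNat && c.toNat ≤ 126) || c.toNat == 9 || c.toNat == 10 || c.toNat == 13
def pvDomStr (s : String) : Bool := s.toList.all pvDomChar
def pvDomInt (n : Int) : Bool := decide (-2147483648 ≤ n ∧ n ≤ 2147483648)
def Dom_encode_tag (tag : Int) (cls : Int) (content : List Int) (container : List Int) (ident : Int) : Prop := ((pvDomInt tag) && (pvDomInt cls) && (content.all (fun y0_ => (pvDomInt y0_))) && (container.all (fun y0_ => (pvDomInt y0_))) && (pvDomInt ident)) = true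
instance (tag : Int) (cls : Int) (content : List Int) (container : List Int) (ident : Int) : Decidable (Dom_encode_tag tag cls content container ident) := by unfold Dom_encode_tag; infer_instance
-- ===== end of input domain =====

-- B replaces A's little-endian length-byte loop + pop-based reversal by a directly computed
-- big-endian byte map of size (bit_length+7)//8 (idiomatic int.to_bytes). Both A and B mutate
-- `container` in place in Python; the equivalence proved here is about the returned list
-- (which is that same list).

-- ===== PORT A =====
-- while tlen: len_bytes.append(tlen & 0xFF); tlen >>= 8   (tlen = len(content), a nonnegative int)
def pvLenBytesA (t : Nat) (len_bytes : List Int) : List Int :=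
  if h : t = 0 then len_bytes
  else pvLenBytesA (t >>> 8) (len_bytes ++ [((t &&& 0xFF : Nat) : Int)])
termination_by t
decreasing_by
  simp only [Nat.shiftRight_eq_div_pow]
  exact Nat.div_lt_self (Nat.pos_of_ne_zero h) (by norm_num)

-- while len_bytes: container.append(len_bytes.pop())
def pvPopLoop (len_bytes container : List Int) : List Int :=
  if h : len_bytes = [] then container
  else pvPopLoop len_bytes.dropLast (container ++ [len_bytes.getLast h])
termination_by len_bytes.length
decreasing_by
  simp only [List.length_dropLast]
  have := List.length_pos_of_ne_nil h
  omega

def encode_tag (tag : Int) (cls : Int) (content : List Int) (container : List Int) (ident : Int) : List Int :=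
  let container := container ++ [Int.lor tag (Int.shiftLeft cls 6)]
  let tlen := content.length
  if tlen < 128 then
    (container ++ [(tlen : Int)]) ++ content
  else
    let len_bytes := pvLenBytesA tlen []
    let container := container ++ [Int.lor 0x80 (len_bytes.length : Int)]
    (pvPopLoop len_bytes container) ++ content

-- ===== PORT B =====
-- tlen.to_bytes(n, 'big'): the n bytes of tlen, most significant first
def pvBigBytes (n t : Nat) : List Int :=
  (List.range n).map (fun i => (((t >>> (8 * (n - 1 - i))) &&& 0xFF : Nat) : Int))

def encode_tag_alt (tag : Int) (cls : Int) (content : List Int) (container : List Int) (ident : Int) : List Int :=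
  let container := container ++ [Int.lor tag (Int.shiftLeft cls 6)]
  let tlen := content.length
  if tlen < 128 then
    (container ++ [(tlen : Int)]) ++ content
  else
    let n := (Nat.size tlen + 7) / 8          -- (tlen.bit_length() + 7) // 8
    ((container ++ [Int.lor 0x80 (n : Int)]) ++ pvBigBytes n tlen) ++ content

-- ===== PRECONDITION & SPEC =====
def Spec_encode_tag (tag : Int) (cls : Int) (content : List Int) (container : List Int) (ident : Int) (out : List Int) : Prop := out = encode_tag_alt tag cls content container ident
instance (tag : Int) (cls : Int) (content : List Int) (container : List Int) (ident : Int) (out : List Int) : Decidable (Spec_encode_tag tag cls content container ident out) := by unfold Spec_encode_tag; infer_instance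

-- ===== CLAIM (what is proved, stated in full; the proofs are below) =====
def Claim_equal_encode_tag : Prop := ∀ (tag : Int) (cls : Int) (content : List Int) (container : List Int) (ident : Int), Dom_encode_tag tag cls content container ident → Spec_encode_tag tag cls content container ident (encode_tag tag cls content container ident)

-- ===== LEMMAS AND PROOFS =====

theorem pvPopLoop_eq_reverse (len_bytes : List Int) : ∀ container, pvPopLoop len_bytes container = container ++ len_bytes.reverse := by
  induction len_bytes using List.reverseRecOn with
  | nil => intro c; rw [pvPopLoop]; simp
  | append_singleton ys y ih =>
    intro c
    rw [pvPopLoop]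
    rw [dif_neg (by simp : ys ++ [y] ≠ [])]
    simp only [List.dropLast_concat, List.getLast_append]
    rw [ih]
    simp

theorem pvLenBytesA_acc (t : Nat) : ∀ acc, pvLenBytesA t acc = acc ++ pvLenBytesA t [] := by
  induction t using Nat.strong_induction_on with
  | _ t ih =>
    intro acc
    by_cases h : t = 0
    · subst h
      rw [pvLenBytesA]
      conv_rhs => rw [pvLenBytesA]
      simp
    · have hlt : t >>> 8 < t := by
        simp only [Nat.shiftRight_eq_div_pow]
        exact Nat.div_lt_self (Nat.pos_of_ne_zero h) (by norm_num)
      rw [pvLenBytesA]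
      conv_rhs => rw [pvLenBytesA]
      simp only [h, dite_false]
      rw [ih (t >>> 8) hlt (acc ++ [((t &&& 255 : Nat) : Int)]),
          ih (t >>> 8) hlt ([] ++ [((t &&& 255 : Nat) : Int)])]
      simp

theorem pvSize_shiftRight8 (t : Nat) (h : 256 ≤ t) : (t >>> 8).size = t.size - 8 := by
  have hlt : t < 2 ^ t.size := Nat.lt_size_self t
  have hs9 : 8 < t.size := Nat.lt_size.mpr (by norm_num; omega)
  have hdiv : t >>> 8 = t / 256 := by norm_num [Nat.shiftRight_eq_div_pow]
  apply le_antisymm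
  · rw [Nat.size_le, hdiv]
    have : (2 : ℕ) ^ (t.size - 8) * 256 = 2 ^ t.size := by
      have : (256 : ℕ) = 2 ^ 8 := by norm_num
      rw [this, ← pow_add]
      congr 1; omega
    omega
  · have : t.size - 9 < (t >>> 8).size := by
      rw [Nat.lt_size, hdiv, Nat.le_div_iff_mul_le (by norm_num)]
      have hge : 2 ^ (t.size - 1) ≤ t := by
        have := Nat.lt_size.mp (show t.size - 1 < t.size by omega)
        exact this
      have : (2 : ℕ) ^ (t.size - 9) * 256 = 2 ^ (t.size - 1) := by
        have h256 : (256 : ℕ) = 2 ^ 8 := by norm_num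
        rw [h256, ← pow_add]
        congr 1; omega
      omega
    omega

theorem pvBigBytes_succ (m t : Nat) :
    pvBigBytes (m + 1) t = pvBigBytes m (t >>> 8) ++ [((t &&& 0xFF : Nat) : Int)] := by
  unfold pvBigBytes
  rw [List.range_succ, List.map_append]
  congr 1
  · apply List.map_congr_left
    intro i hi
    have hi' : i < m := List.mem_range.mp hi
    congr 2
    rw [← Nat.shiftRight_add]
    congr 1
    omega
  · simp

theorem pvLittle_big (t : Nat) (ht : t ≠ 0) :
    (pvLenBytesA t []).reverse = pvBigBytes ((t.size + 7) / 8) t := by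
  induction t using Nat.strong_induction_on with
  | _ t ih =>
    rw [pvLenBytesA]
    simp only [ht, dite_false]
    rw [pvLenBytesA_acc]
    by_cases h256 : t < 256
    · have h0 : t >>> 8 = 0 := by
        norm_num [Nat.shiftRight_eq_div_pow]
        omega
      have hsz1 : (t.size + 7) / 8 = 1 := by
        have h1 : t.size ≤ 8 := Nat.size_le.mpr (by omega)
        have h2 : 0 < t.size := Nat.size_pos.mpr (Nat.pos_of_ne_zero ht)
        omega
      rw [h0, hsz1, pvLenBytesA]
      simp [pvBigBytes]
    · replace h256 : 256 ≤ t := Nat.le_of_not_lt h256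
      have hne : t >>> 8 ≠ 0 := by
        norm_num [Nat.shiftRight_eq_div_pow]
        omega
      have hlt : t >>> 8 < t := by
        simp only [Nat.shiftRight_eq_div_pow]
        exact Nat.div_lt_self (by omega) (by norm_num)
      have hsz : ((t >>> 8).size + 7) / 8 + 1 = (t.size + 7) / 8 := by
        rw [pvSize_shiftRight8 t h256]
        have hs9 : 8 < t.size := Nat.lt_size.mpr (by norm_num; omega)
        omega
      rw [← hsz, pvBigBytes_succ]
      simp only [List.reverse_append, List.reverse_cons, List.reverse_nil]
      rw [ih (t >>> 8) hlt hne]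
      simp

theorem pvLittle_length (t : Nat) (ht : t ≠ 0) :
    (pvLenBytesA t []).length = (t.size + 7) / 8 := by
  have := congrArg List.length (pvLittle_big t ht)
  simpa [pvBigBytes] using this

-- ===== VERDICT (by name: the statement is the Claim_ definition above) =====
theorem encode_tag_spec : Claim_equal_encode_tag := by
  intro tag cls content container ident _
  unfold Spec_encode_tag encode_tag encode_tag_alt
  by_cases h : content.length < 128
  · simp [h]
  · simp only [h, if_false]
    have ht : content.length ≠ 0 := by omega
    rw [pvPopLoop_eq_reverse, pvLittle_big _ ht, pvLittle_length _ ht]
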